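-- pv_equiv track=rewrite | github.com/CodingEZ/Scrabble-AI | humanChecker.py | getMainCombo
-- ===== SOURCE A (Python) =====
-- def getMainCombo(isRowCombo, occupied, situation):
--     ''' Get the spots that correspond to the main combo in order '''
--     spot = situation[0]
--     locations = [spot]
--     locator = spot
--     if isRowCombo:
--         while (((locator + 1) in occupied) or ((locator + 1) in situation)) and (locator%15 != 14):
--             locator += 1
--             locations.append(locator)
--         locator = spot      # resets the locator to the original position
--         while (((locator - 1) in occupied) or ((locator - 1) in situation)) and (locator%15 != 0):
--             locator -= 1
--             locations.append(locator)
--     else: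
--         while ((locator + 15) in occupied) or ((locator + 15) in situation):
--             locator += 15
--             locations.append(locator)
--         locator = spot      # resets the locator to the original position
--         while ((locator - 15) in occupied) or ((locator - 15) in situation):
--             locator -= 15
--             locations.append(locator)
--     return sorted(locations)
-- ===== SOURCE B (Python) =====
-- def getMainCombo(isRowCombo, occupied, situation):
--     ''' Get the spots that correspond to the main combo in order '''
--     spot = situation[0]
--     step = 1 if isRowCombo else 15
--     cells = set(occupied) | set(situation)
--     if isRowCombo:
--         line = sorted(x for x in cells if x // 15 == spot // 15)
--     else:
--         line = sorted(x for x in cells if x % 15 == spot % 15)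
--     def connected(x):
--         lo, hi = (x, spot) if x < spot else (spot, x)
--         return all(y in cells for y in range(lo, hi + 1, step))
--     return [x for x in line if connected(x)]
-- ===== Notes on version B (the rewrite author's own statement) =====
-- stated objective: alternative
-- what changed: A walks step-by-step in both directions from the start cell, appending each visited cell and sorting at the end; B never walks: it builds the set of occupied cells, filters it down to the cells on spot's row (same //15) or column (same %15), sorts that line, and keeps exactly the cells whose entire segment to spot is occupied (an all-of-range connectivity test).
import Mathlib
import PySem

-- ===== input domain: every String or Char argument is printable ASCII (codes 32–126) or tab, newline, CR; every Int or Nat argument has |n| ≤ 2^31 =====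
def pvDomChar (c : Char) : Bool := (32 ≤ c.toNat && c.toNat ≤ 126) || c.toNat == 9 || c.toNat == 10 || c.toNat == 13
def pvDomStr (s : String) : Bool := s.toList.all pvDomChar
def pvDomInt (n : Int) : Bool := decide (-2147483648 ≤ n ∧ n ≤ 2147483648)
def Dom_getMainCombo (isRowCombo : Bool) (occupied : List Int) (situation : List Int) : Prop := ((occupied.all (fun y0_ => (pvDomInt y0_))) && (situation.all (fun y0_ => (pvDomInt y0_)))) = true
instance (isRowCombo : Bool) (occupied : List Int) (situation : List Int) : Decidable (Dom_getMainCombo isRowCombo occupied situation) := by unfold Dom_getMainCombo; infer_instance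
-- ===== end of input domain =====

-- B replaces A's two directional walks (append every visited cell, sort at the end) by a
-- declarative computation: build the set of occupied cells, keep the cells on spot's
-- row/column line, sort the line, and filter it by an all-of-range connectivity test to
-- spot (objective: alternative; no speed claim).

-- ===== PORT A =====
-- membership test '(x in occupied) or (x in situation)'
def pvOk (occupied situation : List Int) (x : Int) : Bool :=
  occupied.contains x || situation.contains x

-- A's first while loop: walks up appending each new locator; fuel bounds the iteration
-- count (each step's new locator is a fresh member of occupied ∪ situation, so
-- occupied.length + situation.length + 1 iterations always suffice).
def pvUpA (occupied situation : List Int) (row : Bool) (step : Int) : Nat → Int → List Int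
  | 0, _ => []
  | f+1, loc =>
    if pvOk occupied situation (loc + step) && (!row || PySem.Int.mod loc 15 != 14) then
      (loc + step) :: pvUpA occupied situation row step f (loc + step)
    else []

-- A's second while loop: walks down appending each new locator
def pvDownA (occupied situation : List Int) (row : Bool) (step : Int) : Nat → Int → List Int
  | 0, _ => []
  | f+1, loc =>
    if pvOk occupied situation (loc - step) && (!row || PySem.Int.mod loc 15 != 0) then
      (loc - step) :: pvDownA occupied situation row step f (loc - step)
    else []

def getMainCombo (isRowCombo : Bool) (occupied : List Int) (situation : List Int) : List Int :=
  match situation with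
  | [] => []  -- situation[0] raises IndexError; excluded by Pre_
  | spot :: _ =>
    let fuel := occupied.length + situation.length + 1
    let locations :=
      if isRowCombo then
        spot :: (pvUpA occupied situation true 1 fuel spot ++ pvDownA occupied situation true 1 fuel spot)
      else
        spot :: (pvUpA occupied situation false 15 fuel spot ++ pvDownA occupied situation false 15 fuel spot)
    PySem.List.sorted locations (fun x => x)

-- ===== PORT B =====
-- cells = set(occupied) | set(situation)
def pvCells (occupied situation : List Int) : PySem.Set Int :=
  PySem.Set.union (PySem.Set.ofList occupied) situation

-- connected(x): all(y in cells for y in range(lo, hi + 1, step))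
def pvConnected (cells : PySem.Set Int) (spot step x : Int) : Bool :=
  let lo := if x < spot then x else spot
  let hi := if x < spot then spot else x
  (PySem.List.pyRange lo (hi + 1) step).all (fun y => PySem.Set.contains cells y)

def getMainCombo_alt (isRowCombo : Bool) (occupied : List Int) (situation : List Int) : List Int :=
  match situation with
  | [] => []  -- situation[0] raises IndexError; excluded by Pre_
  | spot :: rest =>
    let step : Int := if isRowCombo then 1 else 15
    let cells := pvCells occupied (spot :: rest)
    let line :=
      if isRowCombo then
        PySem.List.sorted (cells.filter (fun x => PySem.Int.floordiv x 15 == PySem.Int.floordiv spot 15)) (fun x => x)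
      else
        PySem.List.sorted (cells.filter (fun x => PySem.Int.mod x 15 == PySem.Int.mod spot 15)) (fun x => x)
    line.filter (fun x => pvConnected cells spot step x)

-- ===== PRECONDITION & SPEC =====
-- Pre_ excludes only the empty situation list, on which A raises IndexError at situation[0].
def Pre_getMainCombo (isRowCombo : Bool) (occupied : List Int) (situation : List Int) : Prop :=
  situation ≠ []
instance (isRowCombo : Bool) (occupied : List Int) (situation : List Int) : Decidable (Pre_getMainCombo isRowCombo occupied situation) := by unfold Pre_getMainCombo; infer_instance

def pvWitness_getMainCombo : Bool × List Int × List Int := (true, [8, 9], [7])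

def Spec_getMainCombo (isRowCombo : Bool) (occupied : List Int) (situation : List Int) (out : List Int) : Prop := out = getMainCombo_alt isRowCombo occupied situation
instance (isRowCombo : Bool) (occupied : List Int) (situation : List Int) (out : List Int) : Decidable (Spec_getMainCombo isRowCombo occupied situation out) := by unfold Spec_getMainCombo; infer_instance

-- ===== CLAIM (what is proved, stated in full; the proofs are below) =====
def Claim_equal_getMainCombo : Prop := ∀ (isRowCombo : Bool) (occupied : List Int) (situation : List Int), Dom_getMainCombo isRowCombo occupied situation → Pre_getMainCombo isRowCombo occupied situation → Spec_getMainCombo isRowCombo occupied situation (getMainCombo isRowCombo occupied situation)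

-- ===== LEMMAS AND PROOFS =====

-- proof-side helpers: the endpoints A's two walks reach (used to NAME the common value
-- of both programs: the range from the lowest to the highest reached cell)
def pvWalkHi (occupied situation : List Int) (row : Bool) (step : Int) : Nat → Int → Int
  | 0, loc => loc
  | f+1, loc =>
    if pvOk occupied situation (loc + step) && (!row || PySem.Int.mod loc 15 != 14) then
      pvWalkHi occupied situation row step f (loc + step)
    else loc

def pvWalkLo (occupied situation : List Int) (row : Bool) (step : Int) : Nat → Int → Int
  | 0, loc => loc
  | f+1, loc =>
    if pvOk occupied situation (loc - step) && (!row || PySem.Int.mod loc 15 != 0) then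
      pvWalkLo occupied situation row step f (loc - step)
    else loc

-- pyRange over a whole number of positive steps is a map over List.range
lemma pvPyRange_steps (a : Int) (n : Nat) (s : Int) (hs : 0 < s) :
    PySem.List.pyRange a (a + s * n) s = (List.range n).map (fun k : Nat => a + s * (k : Int)) := by
  rw [PySem.List.pyRange_of_pos _ _ hs]
  have hcount : (if a < a + s * (n : Int) then ((a + s * (n : Int) - a + s - 1) / s).toNat else 0) = n := by
    rcases Nat.eq_zero_or_pos n with h | h
    · simp [h]
    · have hlt : a < a + s * (n : Int) := by
        have : 0 < s * (n : Int) := by positivity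
        omega
      rw [if_pos hlt]
      have h1 : a + s * (n : Int) - a + s - 1 = (s - 1) + (n : Int) * s := by ring
      rw [h1, Int.add_mul_ediv_right _ _ (by omega : s ≠ 0),
          Int.ediv_eq_zero_of_lt (by omega) (by omega)]
      omega
  rw [hcount]

-- a pyRange with a positive step is strictly increasing
lemma pvRangePairwise (a b s : Int) (hs : 0 < s) :
    (PySem.List.pyRange a b s).Pairwise (· < ·) := by
  rw [PySem.List.pyRange_of_pos _ _ hs]
  refine List.Pairwise.map _ (fun {p q} (h : p < q) => ?_) (List.pairwise_lt_range)
  have hq : (p : Int) < q := by exact_mod_cast h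
  nlinarith

-- two strictly increasing integer lists with the same members are equal
lemma pvEqOfLt {xs ys : List Int} (h1 : xs.Pairwise (· < ·)) (h2 : ys.Pairwise (· < ·))
    (hm : ∀ x, x ∈ xs ↔ x ∈ ys) : xs = ys :=
  List.eq_of_perm_of_sorted (fun _ _ _ _ hab hba => absurd hab (lt_asymm hba)) h1 h2
    ((List.perm_ext_iff_of_nodup (h1.imp ne_of_lt) (h2.imp ne_of_lt)).mpr hm)

-- boolean conjunction elimination used on the walk guards
lemma pvAndElim {a b : Bool} (h : (a && b) = true) : a = true ∧ b = true := by
  cases a <;> cases b <;> simp_all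

-- B's forward endpoint lands exactly s * (length of A's up list) above the start
lemma pvEnd_eq (occ sit : List Int) (row : Bool) (s : Int) :
    ∀ (f : Nat) (loc : Int),
      pvWalkHi occ sit row s f loc = loc + s * ((pvUpA occ sit row s f loc).length : Int) := by
  intro f
  induction f with
  | zero => intro loc; simp [pvWalkHi, pvUpA]
  | succ f ih =>
    intro loc
    by_cases h : (pvOk occ sit (loc + s) && (!row || PySem.Int.mod loc 15 != 14)) = true
    · simp only [pvWalkHi, pvUpA, if_pos h, ih (loc + s), List.length_cons]
      push_cast; ring
    · simp only [pvWalkHi, pvUpA, if_neg h, List.length_nil]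
      ring

-- A's up list is the increasing run loc+s, loc+2s, …
lemma pvUp_eq (occ sit : List Int) (row : Bool) (s : Int) :
    ∀ (f : Nat) (loc : Int),
      pvUpA occ sit row s f loc =
        (List.range (pvUpA occ sit row s f loc).length).map
          (fun k : Nat => (loc + s) + s * (k : Int)) := by
  intro f
  induction f with
  | zero => intro loc; simp [pvUpA]
  | succ f ih =>
    intro loc
    by_cases h : (pvOk occ sit (loc + s) && (!row || PySem.Int.mod loc 15 != 14)) = true
    · simp only [pvUpA, if_pos h, List.length_cons]
      rw [List.range_succ_eq_map, List.map_cons, List.map_map]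
      refine List.cons_eq_cons.mpr ⟨by push_cast; ring, ?_⟩
      rw [ih (loc + s)]
      simp only [List.length_map, List.length_range]
      refine List.map_congr_left (fun kk _ => ?_)
      simp only [Function.comp_apply, Nat.succ_eq_add_one]
      push_cast; ring
    · simp only [pvUpA, if_neg h, List.length_nil]
      simp

-- B's backward endpoint lands exactly s * (length of A's down list) below the start
lemma pvStart_eq (occ sit : List Int) (row : Bool) (s : Int) :
    ∀ (f : Nat) (loc : Int),
      pvWalkLo occ sit row s f loc = loc - s * ((pvDownA occ sit row s f loc).length : Int) := by
  intro f
  induction f with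
  | zero => intro loc; simp [pvWalkLo, pvDownA]
  | succ f ih =>
    intro loc
    by_cases h : (pvOk occ sit (loc - s) && (!row || PySem.Int.mod loc 15 != 0)) = true
    · simp only [pvWalkLo, pvDownA, if_pos h, ih (loc - s), List.length_cons]
      push_cast; ring
    · simp only [pvWalkLo, pvDownA, if_neg h, List.length_nil]
      ring

-- A's down list, reversed, is the increasing run starting at the bottom position
lemma pvDown_rev (occ sit : List Int) (row : Bool) (s : Int) :
    ∀ (f : Nat) (loc : Int),
      (pvDownA occ sit row s f loc).reverse =
        (List.range (pvDownA occ sit row s f loc).length).map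
          (fun k : Nat => (loc - s * ((pvDownA occ sit row s f loc).length : Int)) + s * (k : Int)) := by
  intro f
  induction f with
  | zero => intro loc; simp [pvDownA]
  | succ f ih =>
    intro loc
    by_cases h : (pvOk occ sit (loc - s) && (!row || PySem.Int.mod loc 15 != 0)) = true
    · simp only [pvDownA, if_pos h, List.reverse_cons, List.length_cons]
      rw [ih (loc - s), List.range_succ, List.map_append, List.map_cons, List.map_nil]
      congr 1
      · refine List.map_congr_left (fun kk _ => ?_)
        push_cast; ring
      · refine congrArg (fun z => [z]) ?_
        push_cast; ring
    · simp only [pvDownA, if_neg h, List.length_nil]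
      simp

-- the A-side equation: sorted(A's accumulated list) = the range between the walk endpoints
lemma pvMain (occ sit : List Int) (row : Bool) (s : Int) (hs : 0 < s) (f : Nat) (spot : Int) :
    PySem.List.sorted (spot :: (pvUpA occ sit row s f spot ++ pvDownA occ sit row s f spot)) (fun x => x) =
    PySem.List.pyRange (pvWalkLo occ sit row s f spot) (pvWalkHi occ sit row s f spot + s) s := by
  set up := pvUpA occ sit row s f spot with hup
  set dn := pvDownA occ sit row s f spot with hdn
  set k := up.length with hk
  set m := dn.length with hm
  set st := spot - s * (m : Int) with hst
  have hstart : pvWalkLo occ sit row s f spot = st := pvStart_eq occ sit row s f spot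
  have hend : pvWalkHi occ sit row s f spot = spot + s * (k : Int) := pvEnd_eq occ sit row s f spot
  have hendpt : pvWalkHi occ sit row s f spot + s = st + s * ((m + 1 + k : Nat) : Int) := by
    rw [hend, hst]; push_cast; ring
  rw [hstart, hendpt, pvPyRange_steps st (m + 1 + k) s hs]
  apply PySem.List.sorted_eq_of_perm_of_pairwise_lt
  · -- the range is a permutation of spot :: (up ++ dn)
    have hsplit : (List.range (m + 1 + k)).map (fun i : Nat => st + s * (i : Int)) =
        ((List.range m).map (fun i : Nat => st + s * (i : Int))) ++
          (spot :: (List.range k).map (fun i : Nat => (spot + s) + s * (i : Int))) := by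
      rw [List.range_add, List.map_append, List.map_map, List.range_succ,
          List.map_append, List.map_cons, List.map_nil, List.append_assoc]
      congr 1
      rw [List.singleton_append]
      refine List.cons_eq_cons.mpr ⟨by rw [hst]; ring, ?_⟩
      refine List.map_congr_left (fun i _ => ?_)
      simp only [Function.comp_apply]
      rw [hst]; push_cast; ring
    rw [hsplit]
    have hdnrev : (List.range m).map (fun i : Nat => st + s * (i : Int)) = dn.reverse := by
      rw [hdn, pvDown_rev occ sit row s f spot]
    have hupeq : (List.range k).map (fun i : Nat => (spot + s) + s * (i : Int)) = up := by
      rw [hup, ← pvUp_eq occ sit row s f spot]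
    rw [hdnrev, hupeq]
    have p1 : (dn.reverse ++ (spot :: up)).Perm ((spot :: up) ++ dn.reverse) :=
      List.perm_append_comm
    have p2 : ((spot :: up) ++ dn.reverse).Perm (spot :: (up ++ dn)) := by
      simp only [List.cons_append]
      exact List.Perm.cons spot (List.Perm.append_left up dn.reverse_perm)
    exact p1.trans p2
  · -- the range is strictly increasing
    rw [List.pairwise_map]
    refine List.pairwise_lt_range.imp ?_
    intro a b hab
    have hcast : (a : Int) < (b : Int) := by exact_mod_cast hab
    have := mul_lt_mul_of_pos_left hcast hs
    linarith

-- membership form of A's 'in or in' test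
lemma pvOk_iff (occ sit : List Int) (x : Int) :
    pvOk occ sit x = true ↔ x ∈ occ ∨ x ∈ sit := by
  simp [pvOk]

-- B's cell set contains exactly what A's membership test accepts
lemma pvCells_contains (occ sit : List Int) (x : Int) :
    PySem.Set.contains (pvCells occ sit) x = true ↔ pvOk occ sit x = true := by
  rw [PySem.Set.contains_iff, pvCells, PySem.Set.mem_union, PySem.Set.mem_ofList, pvOk_iff]

lemma pvCells_mem (occ sit : List Int) (x : Int) :
    x ∈ pvCells occ sit ↔ x ∈ occ ∨ x ∈ sit := by
  rw [pvCells, PySem.Set.mem_union, PySem.Set.mem_ofList]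

-- every cell A's up walk appends passed the membership test
lemma pvUpA_ok (occ sit : List Int) (row : Bool) (s : Int) :
    ∀ (f : Nat) (loc : Int), ∀ x ∈ pvUpA occ sit row s f loc, pvOk occ sit x = true := by
  intro f
  induction f with
  | zero => intro loc x hx; simp [pvUpA] at hx
  | succ f ih =>
    intro loc x hx
    by_cases h : (pvOk occ sit (loc + s) && (!row || PySem.Int.mod loc 15 != 14)) = true
    · simp only [pvUpA, if_pos h] at hx
      rcases List.mem_cons.mp hx with rfl | hx'
      · exact (pvAndElim h).1
      · exact ih (loc + s) x hx'
    · simp only [pvUpA, if_neg h] at hx; simp at hx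

lemma pvDownA_ok (occ sit : List Int) (row : Bool) (s : Int) :
    ∀ (f : Nat) (loc : Int), ∀ x ∈ pvDownA occ sit row s f loc, pvOk occ sit x = true := by
  intro f
  induction f with
  | zero => intro loc x hx; simp [pvDownA] at hx
  | succ f ih =>
    intro loc x hx
    by_cases h : (pvOk occ sit (loc - s) && (!row || PySem.Int.mod loc 15 != 0)) = true
    · simp only [pvDownA, if_pos h] at hx
      rcases List.mem_cons.mp hx with rfl | hx'
      · exact (pvAndElim h).1
      · exact ih (loc - s) x hx'
    · simp only [pvDownA, if_neg h] at hx; simp at hx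

-- the walks visit pairwise-distinct members of occupied ++ situation, so their length
-- is bounded by the total number of cells (fuel n+m+1 is never exhausted)
lemma pvUpA_len_le (occ sit : List Int) (row : Bool) (s : Int) (hs : 0 < s) (f : Nat) (loc : Int) :
    (pvUpA occ sit row s f loc).length ≤ occ.length + sit.length := by
  have hnd : (pvUpA occ sit row s f loc).Nodup := by
    rw [pvUp_eq occ sit row s f loc]
    refine List.Nodup.map ?_ (List.nodup_range)
    intro a b hab
    have : s * (a : Int) = s * (b : Int) := by linarith [add_left_cancel hab]
    exact_mod_cast mul_left_cancel₀ (by omega : s ≠ 0) this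
  have hsub : pvUpA occ sit row s f loc ⊆ occ ++ sit := by
    intro x hx
    rcases (pvOk_iff occ sit x).mp (pvUpA_ok occ sit row s f loc x hx) with h | h
    · exact List.mem_append.mpr (Or.inl h)
    · exact List.mem_append.mpr (Or.inr h)
  have := (hnd.subperm hsub).length_le
  simpa using this
lemma pvDownA_len_le (occ sit : List Int) (row : Bool) (s : Int) (hs : 0 < s) (f : Nat) (loc : Int) :
    (pvDownA occ sit row s f loc).length ≤ occ.length + sit.length := by
  have hnd : (pvDownA occ sit row s f loc).Nodup := by
    have := pvDown_rev occ sit row s f loc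
    have hrev : (pvDownA occ sit row s f loc).reverse.Nodup := by
      rw [this]
      refine List.Nodup.map ?_ (List.nodup_range)
      intro a b hab
      have : s * (a : Int) = s * (b : Int) := by linarith [add_left_cancel hab]
      exact_mod_cast mul_left_cancel₀ (by omega : s ≠ 0) this
    simpa using hrev
  have hsub : pvDownA occ sit row s f loc ⊆ occ ++ sit := by
    intro x hx
    rcases (pvOk_iff occ sit x).mp (pvDownA_ok occ sit row s f loc x hx) with h | h
    · exact List.mem_append.mpr (Or.inl h)
    · exact List.mem_append.mpr (Or.inr h)
  have := (hnd.subperm hsub).length_le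
  simpa using this

-- if the fuel was not exhausted, the up walk stopped because its guard went false
lemma pvUpA_stop (occ sit : List Int) (row : Bool) (s : Int) :
    ∀ (f : Nat) (loc : Int), (pvUpA occ sit row s f loc).length < f →
      (pvOk occ sit (pvWalkHi occ sit row s f loc + s) &&
        (!row || PySem.Int.mod (pvWalkHi occ sit row s f loc) 15 != 14)) = false := by
  intro f
  induction f with
  | zero => intro loc h; simp at h
  | succ f ih =>
    intro loc h
    by_cases hg : (pvOk occ sit (loc + s) && (!row || PySem.Int.mod loc 15 != 14)) = true
    · simp only [pvUpA, if_pos hg, List.length_cons] at h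
      simp only [pvWalkHi, if_pos hg]
      exact ih (loc + s) (by omega)
    · simp only [pvWalkHi, if_neg hg]
      exact Bool.eq_false_iff.mpr hg

lemma pvDownA_stop (occ sit : List Int) (row : Bool) (s : Int) :
    ∀ (f : Nat) (loc : Int), (pvDownA occ sit row s f loc).length < f →
      (pvOk occ sit (pvWalkLo occ sit row s f loc - s) &&
        (!row || PySem.Int.mod (pvWalkLo occ sit row s f loc) 15 != 0)) = false := by
  intro f
  induction f with
  | zero => intro loc h; simp at h
  | succ f ih =>
    intro loc h
    by_cases hg : (pvOk occ sit (loc - s) && (!row || PySem.Int.mod loc 15 != 0)) = true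
    · simp only [pvDownA, if_pos hg, List.length_cons] at h
      simp only [pvWalkLo, if_pos hg]
      exact ih (loc - s) (by omega)
    · simp only [pvWalkLo, if_neg hg]
      exact Bool.eq_false_iff.mpr hg

-- a positive lattice step of at most s is exactly s
lemma pvLattStep {s x : Int} (hs : 0 < s) (hd : s ∣ x) (h1 : 0 < x) (h2 : x ≤ s) : x = s := by
  rcases hd with ⟨t, rfl⟩
  have ht1 : 1 ≤ t := by nlinarith
  have ht2 : t ≤ 1 := by nlinarith
  have : t = 1 := le_antisymm ht2 ht1
  rw [this, mul_one]

-- the up walk: every lattice point up to the endpoint is an occupied cell on the line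
lemma pvUpW_spec (occ sit : List Int) (row : Bool) (s : Int) (cond : Int → Bool)
    (hs : 0 < s)
    (hg : ∀ e, cond e = true → ((!row || (PySem.Int.mod e 15 != 14)) = cond (e + s))) :
    ∀ (f : Nat) (loc : Int), cond loc = true →
      loc ≤ pvWalkHi occ sit row s f loc ∧
      ∀ x, loc < x → x ≤ pvWalkHi occ sit row s f loc → s ∣ x - loc →
        pvOk occ sit x = true ∧ cond x = true := by
  intro f
  induction f with
  | zero =>
    intro loc _
    refine ⟨by simp [pvWalkHi], ?_⟩
    intro x h1 h2 _
    simp only [pvWalkHi] at h2; omega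
  | succ f ih =>
    intro loc hc
    by_cases h : (pvOk occ sit (loc + s) && (!row || PySem.Int.mod loc 15 != 14)) = true
    · have hok : pvOk occ sit (loc + s) = true := (pvAndElim h).1
      have hcnext : cond (loc + s) = true := by rw [← hg loc hc]; exact (pvAndElim h).2
      have hrec := ih (loc + s) hcnext
      simp only [pvWalkHi, if_pos h]
      refine ⟨by linarith [hrec.1], ?_⟩
      intro x h1 h2 hd
      by_cases hx : x ≤ loc + s
      · have hxe : x = loc + s := by
          have := pvLattStep hs hd (by omega) (by omega)
          omega
        exact hxe ▸ ⟨hok, hcnext⟩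
      · refine hrec.2 x (by omega) h2 ?_
        have : x - (loc + s) = (x - loc) - s := by ring
        rw [this]
        exact dvd_sub hd (dvd_refl s)
    · simp only [pvWalkHi, if_neg h]
      refine ⟨le_refl _, ?_⟩
      intro x h1 h2 _; omega

-- the down walk, symmetrically
lemma pvDnW_spec (occ sit : List Int) (row : Bool) (s : Int) (cond : Int → Bool)
    (hs : 0 < s)
    (hg : ∀ e, cond e = true → ((!row || (PySem.Int.mod e 15 != 0)) = cond (e - s))) :
    ∀ (f : Nat) (loc : Int), cond loc = true →
      pvWalkLo occ sit row s f loc ≤ loc ∧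
      ∀ x, pvWalkLo occ sit row s f loc ≤ x → x < loc → s ∣ loc - x →
        pvOk occ sit x = true ∧ cond x = true := by
  intro f
  induction f with
  | zero =>
    intro loc _
    refine ⟨by simp [pvWalkLo], ?_⟩
    intro x h1 h2 _
    simp only [pvWalkLo] at h1; omega
  | succ f ih =>
    intro loc hc
    by_cases h : (pvOk occ sit (loc - s) && (!row || PySem.Int.mod loc 15 != 0)) = true
    · have hok : pvOk occ sit (loc - s) = true := (pvAndElim h).1
      have hcnext : cond (loc - s) = true := by rw [← hg loc hc]; exact (pvAndElim h).2
      have hrec := ih (loc - s) hcnext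
      simp only [pvWalkLo, if_pos h]
      refine ⟨by linarith [hrec.1], ?_⟩
      intro x h1 h2 hd
      by_cases hx : loc - s ≤ x
      · have hxe : x = loc - s := by
          have := pvLattStep hs hd (by omega) (by omega)
          omega
        exact hxe ▸ ⟨hok, hcnext⟩
      · refine hrec.2 x h1 (by omega) ?_
        have : (loc - s) - x = (loc - x) - s := by ring
        rw [this]
        exact dvd_sub hd (dvd_refl s)
    · simp only [pvWalkLo, if_neg h]
      refine ⟨le_refl _, ?_⟩
      intro x h1 h2 _; omega

-- the generic B-side equation: line-filter + connectivity filter = the walk range.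
-- cond abstracts the line test (same row for //15, same column for %15); the five
-- hypotheses are the arithmetic facts making it agree with A's wrap guards.
lemma pvAltMain (occ rest : List Int) (spot : Int) (row : Bool) (s : Int) (cond : Int → Bool)
    (hs : 0 < s)
    (hgu : ∀ e, cond e = true → ((!row || (PySem.Int.mod e 15 != 14)) = cond (e + s)))
    (hgd : ∀ e, cond e = true → ((!row || (PySem.Int.mod e 15 != 0)) = cond (e - s)))
    (hconv : ∀ a c b, cond a = true → cond b = true → a ≤ c → c ≤ b → s ∣ c - a → cond c = true)
    (hdvd : ∀ x, cond x = true → s ∣ x - spot)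
    (hspot : cond spot = true) :
    (PySem.List.sorted ((pvCells occ (spot :: rest)).filter cond) (fun x => x)).filter
        (fun x => pvConnected (pvCells occ (spot :: rest)) spot s x)
      = PySem.List.pyRange
          (pvWalkLo occ (spot :: rest) row s (occ.length + (spot :: rest).length + 1) spot)
          (pvWalkHi occ (spot :: rest) row s (occ.length + (spot :: rest).length + 1) spot + s) s := by
  set sit := spot :: rest with hsit
  set F := occ.length + sit.length + 1 with hF
  set lo := pvWalkLo occ sit row s F spot with hlo
  set hi := pvWalkHi occ sit row s F spot with hhi
  have hspotok : pvOk occ sit spot = true := by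
    rw [pvOk_iff]; exact Or.inr (by rw [hsit]; exact List.mem_cons_self)
  have hup := pvUpW_spec occ sit row s cond hs hgu F spot hspot
  have hdn := pvDnW_spec occ sit row s cond hs hgd F spot hspot
  -- divisibility of the endpoints
  have hdhi : s ∣ hi - spot := by
    rw [hhi, pvEnd_eq occ sit row s F spot]
    exact ⟨((pvUpA occ sit row s F spot).length : Int), by ring⟩
  have hdlo : s ∣ spot - lo := by
    rw [hlo, pvStart_eq occ sit row s F spot]
    exact ⟨((pvDownA occ sit row s F spot).length : Int), by ring⟩
  -- cond holds at both endpoints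
  have hchi : cond hi = true := by
    rcases eq_or_lt_of_le hup.1 with he | hl
    · rw [hhi, ← he]; exact hspot
    · exact (hup.2 hi hl (le_refl _) hdhi).2
  have hclo : cond lo = true := by
    rcases eq_or_lt_of_le hdn.1 with he | hl
    · rw [hlo, he]; exact hspot
    · exact (hdn.2 lo (le_refl _) hl hdlo).2
  -- the walks stopped because their guards went false (the fuel cannot run out)
  have hstopu : ¬ (pvOk occ sit (hi + s) = true ∧ cond (hi + s) = true) := by
    have hlen : (pvUpA occ sit row s F spot).length < F := by
      have := pvUpA_len_le occ sit row s hs F spot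
      omega
    have h := pvUpA_stop occ sit row s F spot hlen
    rw [← hhi] at h
    rw [← hgu hi hchi]
    intro ⟨h1, h2⟩
    rw [h1, h2] at h
    simp at h
  have hstopd : ¬ (pvOk occ sit (lo - s) = true ∧ cond (lo - s) = true) := by
    have hlen : (pvDownA occ sit row s F spot).length < F := by
      have := pvDownA_len_le occ sit row s hs F spot
      omega
    have h := pvDownA_stop occ sit row s F spot hlen
    rw [← hlo] at h
    rw [← hgd lo hclo]
    intro ⟨h1, h2⟩
    rw [h1, h2] at h
    simp at h
  -- any occupied lattice cell on the line between lo and hi (inclusive)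
  have hpoint : ∀ x, lo ≤ x → x ≤ hi → s ∣ x - spot → pvOk occ sit x = true ∧ cond x = true := by
    intro x h1 h2 hd
    rcases lt_trichotomy x spot with hlt | heq | hgt
    · exact hdn.2 x h1 hlt (by have := dvd_neg.mpr hd; simpa using this)
    · exact heq ▸ ⟨hspotok, hspot⟩
    · exact hup.2 x hgt h2 hd
  apply pvEqOfLt
  · -- LHS is strictly increasing
    have hnd0 : ((pvCells occ sit).filter cond).Nodup :=
      List.Nodup.filter _ (PySem.Set.nodup_union _ _ (PySem.Set.nodup_ofList occ))
    have hnd : (PySem.List.sorted ((pvCells occ sit).filter cond) (fun x => x)).Nodup :=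
      (PySem.List.sorted_perm _ _ _).nodup_iff.mpr hnd0
    have hle : (PySem.List.sorted ((pvCells occ sit).filter cond) (fun x => x)).Pairwise
        (fun a b : Int => a ≤ b) := PySem.List.sorted_pairwise _ _
    have hlt : (PySem.List.sorted ((pvCells occ sit).filter cond) (fun x => x)).Pairwise (· < ·) :=
      (hle.and hnd).imp (fun h => lt_of_le_of_ne h.1 h.2)
    exact hlt.filter _
  · exact pvRangePairwise _ _ _ hs
  · -- same members
    intro x
    rw [PySem.List.mem_pyRange_iff_of_pos hs, List.mem_filter, PySem.List.mem_sorted,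
        List.mem_filter]
    constructor
    · rintro ⟨⟨hxm, hxc⟩, hxconn⟩
      have hxd : s ∣ x - spot := hdvd x hxc
      have hxok : pvOk occ sit x = true :=
        (pvOk_iff occ sit x).mpr ((pvCells_mem occ sit x).mp hxm)
      -- connectivity gives every lattice cell between spot and x
      rw [pvConnected] at hxconn
      simp only [List.all_eq_true] at hxconn
      have hconn : ∀ y, (if x < spot then x else spot) ≤ y →
          y ≤ (if x < spot then spot else x) → s ∣ y - (if x < spot then x else spot) →
          pvOk occ sit y = true := by
        intro y hy1 hy2 hyd
        have := hxconn y
          ((PySem.List.mem_pyRange_iff_of_pos hs y).mpr ⟨hy1, by omega, hyd⟩)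
        exact (pvCells_contains occ sit y).mp this
      -- x ≤ hi
      have hxhi : x ≤ hi := by
        by_contra hgt
        push_neg at hgt
        have hxspot : spot < x := by linarith [hup.1]
        have h1 : hi + s ≤ x := by
          have hd2 : s ∣ x - hi := by
            have : x - hi = (x - spot) - (hi - spot) := by ring
            rw [this]; exact dvd_sub hxd hdhi
          have := Int.le_of_dvd (by omega) hd2
          omega
        have hok : pvOk occ sit (hi + s) = true := by
          have := hconn (hi + s)
          rw [if_neg (by omega), if_neg (by omega)] at this
          refine this (by linarith [hup.1]) (by omega) ?_
          have : hi + s - spot = (hi - spot) + s := by ring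
          rw [this]; exact dvd_add hdhi (dvd_refl s)
        have hcnd : cond (hi + s) = true := by
          refine hconv spot (hi + s) x hspot hxc (by linarith [hup.1]) (by omega) ?_
          have : hi + s - spot = (hi - spot) + s := by ring
          rw [this]; exact dvd_add hdhi (dvd_refl s)
        exact hstopu ⟨hok, hcnd⟩
      -- lo ≤ x
      have hxlo : lo ≤ x := by
        by_contra hgt
        push_neg at hgt
        have hxspot : x < spot := by linarith [hdn.1]
        have h1 : x ≤ lo - s := by
          have hd2 : s ∣ lo - x := by
            have : lo - x = (spot - x) - (spot - lo) := by ring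
            rw [this]
            exact dvd_sub (by have := dvd_neg.mpr hxd; simpa using this) hdlo
          have := Int.le_of_dvd (by omega) hd2
          omega
        have hok : pvOk occ sit (lo - s) = true := by
          have := hconn (lo - s)
          rw [if_pos (by omega), if_pos (by omega)] at this
          refine this (by omega) (by linarith [hdn.1]) ?_
          have : lo - s - x = (lo - x) - s := by ring
          rw [this]
          refine dvd_sub ?_ (dvd_refl s)
          have : lo - x = (spot - x) - (spot - lo) := by ring
          rw [this]
          exact dvd_sub (by have := dvd_neg.mpr hxd; simpa using this) hdlo
        have hcnd : cond (lo - s) = true := by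
          refine hconv x (lo - s) spot hxc hspot (by omega) (by linarith [hdn.1]) ?_
          have : lo - s - x = (lo - x) - s := by ring
          rw [this]
          refine dvd_sub ?_ (dvd_refl s)
          have : lo - x = (spot - x) - (spot - lo) := by ring
          rw [this]
          exact dvd_sub (by have := dvd_neg.mpr hxd; simpa using this) hdlo
        exact hstopd ⟨hok, hcnd⟩
      refine ⟨hxlo, by omega, ?_⟩
      have : x - lo = (x - spot) + (spot - lo) := by ring
      rw [this]; exact dvd_add hxd hdlo
    · rintro ⟨h1, h2, h3⟩
      have hxhi : x ≤ hi := by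
        by_contra hgt
        push_neg at hgt
        have hd2 : s ∣ x - hi := by
          have hx : x - hi = (x - lo) - (hi - spot) - (spot - lo) := by ring
          rw [hx]
          exact dvd_sub (dvd_sub h3 hdhi) hdlo
        have := Int.le_of_dvd (by omega) hd2
        omega
      have hxd : s ∣ x - spot := by
        have : x - spot = (x - lo) - (spot - lo) := by ring
        rw [this]; exact dvd_sub h3 hdlo
      have hx := hpoint x h1 hxhi hxd
      refine ⟨⟨?_, hx.2⟩, ?_⟩
      · rw [pvCells_mem]; exact (pvOk_iff occ sit x).mp hx.1
      · -- the connectivity test passes: every cell of the segment is between lo and hi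
        rw [pvConnected]
        simp only [List.all_eq_true]
        intro y hy
        rw [PySem.List.mem_pyRange_iff_of_pos hs] at hy
        rcases hy with ⟨hy1, hy2, hy3⟩
        rw [pvCells_contains]
        by_cases hxs : x < spot
        · rw [if_pos hxs] at hy1 hy3
          rw [if_pos hxs] at hy2
          refine (hpoint y (by omega) (by linarith [hup.1]) ?_).1
          have : y - spot = (y - x) + (x - spot) := by ring
          rw [this]; exact dvd_add hy3 hxd
        · rw [if_neg hxs] at hy1 hy3
          rw [if_neg hxs] at hy2
          refine (hpoint y (by linarith [hdn.1]) (by omega) ?_).1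
          exact hy3

-- ===== VERDICT (by name: the statement is the Claim_ definition above) =====
theorem getMainCombo_spec : Claim_equal_getMainCombo := by
  intro isRowCombo occupied situation _ hpre
  unfold Spec_getMainCombo
  match situation with
  | [] => exact absurd rfl hpre
  | spot :: rest =>
    cases isRowCombo with
    | true =>
      have hA := pvMain occupied (spot :: rest) true 1 (by norm_num)
        (occupied.length + (spot :: rest).length + 1) spot
      have hB := pvAltMain occupied rest spot true 1
        (fun x => PySem.Int.floordiv x 15 == PySem.Int.floordiv spot 15) (by norm_num)
        ?_ ?_ ?_ ?_ ?_
      · simp only [getMainCombo, getMainCombo_alt, if_true]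
        exact hA.trans hB.symm
      · -- row guard up = staying on the same row
        intro e hc
        simp only [beq_iff_eq,
          PySem.Int.floordiv_eq_ediv_of_pos (show (0:Int) < 15 by norm_num)] at hc
        simp only [Bool.not_true, Bool.false_or]
        rw [Bool.eq_iff_iff]
        simp only [bne_iff_ne, ne_eq, beq_iff_eq,
          PySem.Int.mod_eq_emod_of_pos (show (0:Int) < 15 by norm_num),
          PySem.Int.floordiv_eq_ediv_of_pos (show (0:Int) < 15 by norm_num)]
        omega
      · -- row guard down = staying on the same row
        intro e hc
        simp only [beq_iff_eq,
          PySem.Int.floordiv_eq_ediv_of_pos (show (0:Int) < 15 by norm_num)] at hc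
        simp only [Bool.not_true, Bool.false_or]
        rw [Bool.eq_iff_iff]
        simp only [bne_iff_ne, ne_eq, beq_iff_eq,
          PySem.Int.mod_eq_emod_of_pos (show (0:Int) < 15 by norm_num),
          PySem.Int.floordiv_eq_ediv_of_pos (show (0:Int) < 15 by norm_num)]
        omega
      · -- convexity of the row band
        intro a c b ha hb h1 h2 _
        simp only [beq_iff_eq,
          PySem.Int.floordiv_eq_ediv_of_pos (show (0:Int) < 15 by norm_num)] at ha hb ⊢
        omega
      · intro x _; exact one_dvd _
      · simp
    | false =>
      have hA := pvMain occupied (spot :: rest) false 15 (by norm_num)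
        (occupied.length + (spot :: rest).length + 1) spot
      have hB := pvAltMain occupied rest spot false 15
        (fun x => PySem.Int.mod x 15 == PySem.Int.mod spot 15) (by norm_num)
        ?_ ?_ ?_ ?_ ?_
      · simp only [getMainCombo, getMainCombo_alt]
        exact hA.trans hB.symm
      · -- no wrap guard in the column walk; stepping keeps the residue
        intro e hc
        simp only [beq_iff_eq,
          PySem.Int.mod_eq_emod_of_pos (show (0:Int) < 15 by norm_num)] at hc
        simp only [Bool.not_false, Bool.true_or]
        symm
        rw [beq_iff_eq, PySem.Int.mod_eq_emod_of_pos (show (0:Int) < 15 by norm_num),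
          PySem.Int.mod_eq_emod_of_pos (show (0:Int) < 15 by norm_num)]
        omega
      · intro e hc
        simp only [beq_iff_eq,
          PySem.Int.mod_eq_emod_of_pos (show (0:Int) < 15 by norm_num)] at hc
        simp only [Bool.not_false, Bool.true_or]
        symm
        rw [beq_iff_eq, PySem.Int.mod_eq_emod_of_pos (show (0:Int) < 15 by norm_num),
          PySem.Int.mod_eq_emod_of_pos (show (0:Int) < 15 by norm_num)]
        omega
      · -- convexity of the column residue class
        intro a c b ha hb h1 h2 hd
        simp only [beq_iff_eq,
          PySem.Int.mod_eq_emod_of_pos (show (0:Int) < 15 by norm_num)] at ha hb ⊢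
        omega
      · intro x hc
        simp only [beq_iff_eq,
          PySem.Int.mod_eq_emod_of_pos (show (0:Int) < 15 by norm_num)] at hc
        omega
      · simp
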